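-- pv_equiv track=rewrite | github.com/kimss373/- | 프로그래머스/이진 변환 반복하기.py | to2
-- ===== SOURCE A (Python) =====
-- def to2(x, cnt):
--     result = x
--     answer = []
--     while result >= 1:
--         if result%2 == 1:
--             answer.append(str(result%2))
--         else:
--             cnt += 1
--         result //= 2
--
--     return [len(answer), cnt]
-- ===== SOURCE B (Python) =====
-- def to2(x, cnt):
--     if x < 1:
--         return [0, cnt]
--     ones = x.bit_count()
--     return [ones, cnt + x.bit_length() - ones]
-- ===== Notes on version B (the rewrite author's own statement) =====
-- stated objective: simpler
-- what changed: Replaces the halving while-loop (which appends a string per one-bit and increments cnt per zero-bit) by a closed form: ones = x.bit_count(), zeros = x.bit_length() - ones, returning [ones, cnt + zeros].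
import Mathlib
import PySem

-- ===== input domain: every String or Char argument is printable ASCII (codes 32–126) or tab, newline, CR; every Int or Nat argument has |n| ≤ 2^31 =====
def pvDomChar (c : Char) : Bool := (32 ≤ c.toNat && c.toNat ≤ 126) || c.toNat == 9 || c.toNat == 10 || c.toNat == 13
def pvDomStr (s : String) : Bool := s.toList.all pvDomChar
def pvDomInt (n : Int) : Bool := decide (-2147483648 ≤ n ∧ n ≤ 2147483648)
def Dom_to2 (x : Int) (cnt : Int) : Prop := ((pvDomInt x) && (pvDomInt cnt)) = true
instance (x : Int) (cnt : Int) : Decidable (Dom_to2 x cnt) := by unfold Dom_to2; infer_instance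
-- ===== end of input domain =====

-- B replaces A's halving while-loop by the closed form [bit_count(x), cnt + bit_length(x) - bit_count(x)].


-- ===== PORT A =====
-- A's while loop: appends str(result%2) to answer on odd, bumps cnt on even, halves result.
def to2Loop (result : Int) (answer : List String) (cnt : Int) : List Int :=
  if h : result ≥ 1 then
    if PySem.Int.mod result 2 = 1 then
      to2Loop (PySem.Int.floordiv result 2) (answer ++ [PySem.Int.toStr (PySem.Int.mod result 2)]) cnt
    else
      to2Loop (PySem.Int.floordiv result 2) answer (cnt + 1)
  else
    [(answer.length : Int), cnt]
termination_by result.toNat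
decreasing_by
  all_goals
    have h2 : PySem.Int.floordiv result 2 = result / 2 :=
      PySem.Int.floordiv_eq_ediv_of_pos (by omega)
    simp only [h2]; omega

def to2 (x : Int) (cnt : Int) : List Int := to2Loop x [] cnt

-- ===== PORT B =====
def to2_alt (x : Int) (cnt : Int) : List Int :=
  if x < 1 then [0, cnt]
  else
    let ones : Int := (PySem.Int.bitCount x : Int)
    [ones, cnt + (PySem.Int.bitLength x : Int) - ones]

-- ===== PRECONDITION & SPEC =====
def Spec_to2 (x : Int) (cnt : Int) (out : List Int) : Prop := out = to2_alt x cnt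
instance (x : Int) (cnt : Int) (out : List Int) : Decidable (Spec_to2 x cnt out) := by unfold Spec_to2; infer_instance

-- ===== CLAIM (what is proved, stated in full; the proofs are below) =====
def Claim_equal_to2 : Prop := ∀ (x : Int) (cnt : Int), Dom_to2 x cnt → Spec_to2 x cnt (to2 x cnt)

-- ===== LEMMAS AND PROOFS =====

-- Loop invariant: for result ≥ 0 the loop returns
-- [|answer| + bitCount result, cnt + (bitLength result - bitCount result)].
theorem to2Loop_closed (n : Nat) : ∀ (result : Int), result.toNat = n → 0 ≤ result →
    ∀ (answer : List String) (cnt : Int),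
    to2Loop result answer cnt =
      [(answer.length : Int) + (PySem.Int.bitCount result : Int),
       cnt + ((PySem.Int.bitLength result : Int) - (PySem.Int.bitCount result : Int))] := by
  induction n using Nat.strong_induction_on with
  | _ n ih =>
    intro result hn hnn answer cnt
    rw [to2Loop]
    by_cases h : result ≥ 1
    · have h2 : PySem.Int.floordiv result 2 = result / 2 :=
        PySem.Int.floordiv_eq_ediv_of_pos (by omega)
      have hlt : (result / 2).toNat < n := by omega
      have hnn2 : 0 ≤ result / 2 := by omega
      have hbc := PySem.Int.bitCount_of_pos (n := result) (by omega)
      have hbl := PySem.Int.bitLength_of_pos (n := result) (by omega)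
      have hmod : PySem.Int.mod result 2 = result % 2 :=
        PySem.Int.mod_eq_emod_of_pos (by omega)
      have hml : result % 2 = 0 ∨ result % 2 = 1 := by omega
      have hih := ih (PySem.Int.floordiv result 2).toNat (by rw [h2]; exact hlt)
        (PySem.Int.floordiv result 2) rfl (by rw [h2]; exact hnn2)
      rcases hml with hm | hm
      · rw [dif_pos h, if_neg (by rw [hmod, hm]; norm_num)]
        rw [hih, hbc, hbl, hmod, hm]
        simp; ring
      · rw [dif_pos h, if_pos (by rw [hmod, hm])]
        rw [hih, hbc, hbl, hmod, hm]
        simp; omega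
    · rw [dif_neg h]
      have hz : result = 0 := by omega
      subst hz
      simp [PySem.Int.bitCount_zero, PySem.Int.bitLength_zero]

-- ===== VERDICT (by name: the statement is the Claim_ definition above) =====
theorem to2_spec : Claim_equal_to2 := by
  intro x cnt _
  unfold Spec_to2 to2 to2_alt
  by_cases hx : x < 1
  · rw [to2Loop, dif_neg (by omega), if_pos hx]; simp
  · rw [if_neg hx, to2Loop_closed x.toNat x rfl (by omega)]
    simp; ring
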